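-- pv_equiv track=rewrite | github.com/trace86/jhu-aai | AlphaToe/mapping.py | diagonal_left_search
-- ===== SOURCE A (Python) =====
-- from typing import List, Tuple
--
-- def diagonal_left_search(i: int, j: int, matrix: List[List[int]], num_neighbors: int, symbol: int) -> bool:
--     min_i = 0
--     min_j = 0
--     max_i = len(matrix) - 1
--     max_j = len(matrix[0]) - 1
--
--     xs = []
--     for n in range(1, num_neighbors + 1):
--         _i = i - n
--         _j = j - n
--         if _i >= min_i and _j >= min_j and _i <= max_i and _j <= max_j:
--             xs.append(matrix[_i][_j])
--     if len(xs) != num_neighbors: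
--         return False
--     return all(item == symbol for item in xs)
-- ===== SOURCE B (Python) =====
-- def diagonal_left_search(i: int, j: int, matrix, num_neighbors: int, symbol: int) -> bool:
--     max_i = len(matrix) - 1
--     max_j = len(matrix[0]) - 1
--     for n in range(1, num_neighbors + 1):
--         _i = i - n
--         _j = j - n
--         if _i < 0 or _j < 0 or _i > max_i or _j > max_j:
--             return False
--         if matrix[_i][_j] != symbol:
--             return False
--     return True
-- ===== Notes on version B (the rewrite author's own statement) =====
-- stated objective: simpler
-- what changed: B replaces A's gather-into-a-list + length-equality completeness proxy + all() pass with a single short-circuiting loop over n that returns False as soon as a neighbor is out of bounds or differs from symbol, eliminating the xs list entirely.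
-- outside the precondition, e.g. on diagonal_left_search(0, 0, [[1]], -1, 0): A returns False, B returns True
import Mathlib
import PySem

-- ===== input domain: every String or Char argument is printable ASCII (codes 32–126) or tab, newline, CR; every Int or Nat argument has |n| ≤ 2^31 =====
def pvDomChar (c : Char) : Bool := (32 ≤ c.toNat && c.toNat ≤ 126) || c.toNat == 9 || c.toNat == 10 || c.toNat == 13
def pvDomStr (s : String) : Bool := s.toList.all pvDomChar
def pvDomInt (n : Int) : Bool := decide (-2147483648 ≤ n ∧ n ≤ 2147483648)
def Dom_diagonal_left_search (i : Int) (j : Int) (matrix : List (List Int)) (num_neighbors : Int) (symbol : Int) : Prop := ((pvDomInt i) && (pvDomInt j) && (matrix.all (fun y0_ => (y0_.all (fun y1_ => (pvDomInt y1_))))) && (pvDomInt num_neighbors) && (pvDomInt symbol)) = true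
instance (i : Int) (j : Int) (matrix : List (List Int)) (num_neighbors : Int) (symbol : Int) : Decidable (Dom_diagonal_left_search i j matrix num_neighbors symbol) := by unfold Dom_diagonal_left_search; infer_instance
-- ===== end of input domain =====

-- B replaces A's gather-list + length proxy + all() with one short-circuiting loop; objective: simpler.

-- ===== PORT A =====
def diagonal_left_search (i : Int) (j : Int) (matrix : List (List Int)) (num_neighbors : Int) (symbol : Int) : Bool :=
  let min_i : Int := 0
  let min_j : Int := 0
  let max_i : Int := (matrix.length : Int) - 1
  let max_j : Int := ((PySem.List.pyGetD matrix 0 []).length : Int) - 1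
  let xs : List Int := (PySem.List.pyRange 1 (num_neighbors + 1) 1).foldl
    (fun acc n =>
      let _i := i - n
      let _j := j - n
      if _i ≥ min_i ∧ _j ≥ min_j ∧ _i ≤ max_i ∧ _j ≤ max_j then
        acc ++ [PySem.List.pyGetD (PySem.List.pyGetD matrix _i []) _j 0]
      else acc) []
  if (xs.length : Int) ≠ num_neighbors then false
  else xs.all (fun item => item == symbol)

-- ===== PORT B =====
def dlsGo (i : Int) (j : Int) (matrix : List (List Int)) (max_i : Int) (max_j : Int) (symbol : Int) : List Int → Bool
  | [] => true
  | n :: rest =>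
    let _i := i - n
    let _j := j - n
    if _i < 0 ∨ _j < 0 ∨ _i > max_i ∨ _j > max_j then false
    else if PySem.List.pyGetD (PySem.List.pyGetD matrix _i []) _j 0 ≠ symbol then false
    else dlsGo i j matrix max_i max_j symbol rest

def diagonal_left_search_alt (i : Int) (j : Int) (matrix : List (List Int)) (num_neighbors : Int) (symbol : Int) : Bool :=
  let max_i : Int := (matrix.length : Int) - 1
  let max_j : Int := ((PySem.List.pyGetD matrix 0 []).length : Int) - 1
  dlsGo i j matrix max_i max_j symbol (PySem.List.pyRange 1 (num_neighbors + 1) 1)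

-- ===== PRECONDITION & SPEC =====
-- Pre_ excludes: negative num_neighbors (outside the natural domain; A's length proxy returns False
-- there while B's empty loop returns True), empty matrices (A raises IndexError on matrix[0]), and
-- inputs whose in-bounds diagonal walk reaches past the end of a short row of a ragged matrix
-- (A raises IndexError there); the walk is described per visited row r (step n = i - r).
def Pre_diagonal_left_search (i : Int) (j : Int) (matrix : List (List Int)) (num_neighbors : Int) (symbol : Int) : Prop :=
  0 ≤ num_neighbors ∧ matrix ≠ [] ∧
    ∀ r ∈ List.range matrix.length,
      (1 ≤ i - (r : Int) ∧ i - (r : Int) ≤ num_neighbors ∧ 0 ≤ j - (i - (r : Int)) ∧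
        j - (i - (r : Int)) ≤ ((PySem.List.pyGetD matrix 0 []).length : Int) - 1) →
      j - (i - (r : Int)) < ((matrix.getD r []).length : Int)
instance (i : Int) (j : Int) (matrix : List (List Int)) (num_neighbors : Int) (symbol : Int) : Decidable (Pre_diagonal_left_search i j matrix num_neighbors symbol) := by unfold Pre_diagonal_left_search; infer_instance

def pvWitness_diagonal_left_search : Int × Int × List (List Int) × Int × Int :=
  (2, 2, [[1, 0, 0], [0, 1, 0], [0, 0, 1]], 2, 1)

def Spec_diagonal_left_search (i : Int) (j : Int) (matrix : List (List Int)) (num_neighbors : Int) (symbol : Int) (out : Bool) : Prop := out = diagonal_left_search_alt i j matrix num_neighbors symbol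
instance (i : Int) (j : Int) (matrix : List (List Int)) (num_neighbors : Int) (symbol : Int) (out : Bool) : Decidable (Spec_diagonal_left_search i j matrix num_neighbors symbol out) := by unfold Spec_diagonal_left_search; infer_instance

-- ===== CLAIM (what is proved, stated in full; the proofs are below) =====
def Claim_equal_diagonal_left_search : Prop := ∀ (i : Int) (j : Int) (matrix : List (List Int)) (num_neighbors : Int) (symbol : Int), Dom_diagonal_left_search i j matrix num_neighbors symbol → Pre_diagonal_left_search i j matrix num_neighbors symbol → Spec_diagonal_left_search i j matrix num_neighbors symbol (diagonal_left_search i j matrix num_neighbors symbol)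

-- ===== LEMMAS AND PROOFS =====

-- A's gather loop is a filter+map.
theorem dls_foldl_eq (P : Int → Prop) [DecidablePred P] (v : Int → Int) :
    ∀ (L : List Int) (acc : List Int),
      L.foldl (fun acc n => if P n then acc ++ [v n] else acc) acc
        = acc ++ (L.filter (fun n => decide (P n))).map v := by
  intro L
  induction L with
  | nil => simp
  | cons n rest ih =>
    intro acc
    by_cases h : P n <;> simp [List.foldl, h, ih]

-- B's short-circuit loop is the universally-quantified check over the range list.
theorem dlsGo_eq_true_iff (i j : Int) (matrix : List (List Int)) (max_i max_j symbol : Int) :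
    ∀ (L : List Int),
      dlsGo i j matrix max_i max_j symbol L = true ↔
        ∀ n ∈ L, (0 ≤ i - n ∧ 0 ≤ j - n ∧ i - n ≤ max_i ∧ j - n ≤ max_j) ∧
          PySem.List.pyGetD (PySem.List.pyGetD matrix (i - n) []) (j - n) 0 = symbol := by
  intro L
  induction L with
  | nil => simp [dlsGo]
  | cons n rest ih =>
    simp only [dlsGo, List.mem_cons]
    constructor
    · intro h
      split_ifs at h with h1 h2
      · intro m hm
        rcases hm with rfl | hm
        · push_neg at h1
          push_neg at h2
          exact ⟨⟨h1.1, h1.2.1, h1.2.2.1, h1.2.2.2⟩, h2⟩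
        · exact ih.mp h m hm
    · intro h
      have hn := h n (Or.inl rfl)
      have h1 : ¬ (i - n < 0 ∨ j - n < 0 ∨ i - n > max_i ∨ j - n > max_j) := by
        push_neg; exact ⟨hn.1.1, hn.1.2.1, hn.1.2.2.1, hn.1.2.2.2⟩
      rw [if_neg h1, if_neg (by simpa using hn.2)]
      exact ih.mpr (fun m hm => h m (Or.inr hm))

theorem diagonal_left_search_eq (i j : Int) (matrix : List (List Int)) (num_neighbors symbol : Int)
    (hk : 0 ≤ num_neighbors) :
    diagonal_left_search i j matrix num_neighbors symbol
      = diagonal_left_search_alt i j matrix num_neighbors symbol := by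
  unfold diagonal_left_search diagonal_left_search_alt
  set max_i : Int := (matrix.length : Int) - 1 with hmi
  set max_j : Int := ((PySem.List.pyGetD matrix 0 []).length : Int) - 1 with hmj
  set L := PySem.List.pyRange 1 (num_neighbors + 1) 1 with hL
  set P : Int → Prop := fun n => i - n ≥ 0 ∧ j - n ≥ 0 ∧ i - n ≤ max_i ∧ j - n ≤ max_j with hP
  set v : Int → Int := fun n => PySem.List.pyGetD (PySem.List.pyGetD matrix (i - n) []) (j - n) 0 with hv
  have hfold := dls_foldl_eq P v L []
  simp only []
  rw [show (fun (acc : List Int) (n : Int) =>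
        if i - n ≥ 0 ∧ j - n ≥ 0 ∧ i - n ≤ max_i ∧ j - n ≤ max_j then
          acc ++ [PySem.List.pyGetD (PySem.List.pyGetD matrix (i - n) []) (j - n) 0]
        else acc) = fun acc n => if P n then acc ++ [v n] else acc from rfl, hfold]
  have hLlen : (L.length : Int) = num_neighbors := by
    rw [hL, PySem.List.length_pyRange_one]; omega
  rw [Bool.eq_iff_iff]
  rw [dlsGo_eq_true_iff]
  constructor
  · intro h
    split_ifs at h with hlen
    · simp only [List.nil_append, List.all_eq_true] at h
      push_neg at hlen
      have hfl : ((L.filter (fun n => decide (P n))).length : Int) = (L.length : Int) := by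
        simp only [List.nil_append, List.length_map] at hlen; omega
      have hall : ∀ n ∈ L, P n := by
        have := List.length_filter_eq_length_iff.mp (by exact_mod_cast hfl)
        intro n hn; simpa using this n hn
      intro n hn
      refine ⟨⟨(hall n hn).1, (hall n hn).2.1, (hall n hn).2.2.1, (hall n hn).2.2.2⟩, ?_⟩
      have : v n ∈ (L.filter (fun n => decide (P n))).map v :=
        List.mem_map_of_mem (List.mem_filter.mpr ⟨hn, by simpa using hall n hn⟩)
      simpa using h (v n) this
  · intro h
    have hall : ∀ n ∈ L, P n := fun n hn =>
      ⟨(h n hn).1.1, (h n hn).1.2.1, (h n hn).1.2.2.1, (h n hn).1.2.2.2⟩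
    have hfilt : L.filter (fun n => decide (P n)) = L :=
      List.filter_eq_self.mpr (fun n hn => by simpa using hall n hn)
    rw [List.nil_append, hfilt]
    rw [if_neg (by simp only [List.length_map]; omega)]
    simp only [List.all_eq_true, List.mem_map]
    rintro x ⟨n, hn, rfl⟩
    simpa using (h n hn).2

-- ===== VERDICT (by name: the statement is the Claim_ definition above) =====
theorem diagonal_left_search_spec : Claim_equal_diagonal_left_search := by
  intro i j matrix num_neighbors symbol _ hpre
  exact diagonal_left_search_eq i j matrix num_neighbors symbol hpre.1
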